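-- pv_equiv track=rewrite | github.com/TotzkePaul/OpenClawDiscordVC | app/discord_voice_bot.py | _split_discord_message
-- ===== SOURCE A (Python) =====
-- DISCORD_MESSAGE_LIMIT = 4000
--
-- def _split_discord_message(message: str, limit: int = DISCORD_MESSAGE_LIMIT) -> list[str]:
--     if len(message) <= limit:
--         return [message]
--
--     chunks: list[str] = []
--     remaining = message
--     while remaining:
--         if len(remaining) <= limit:
--             chunks.append(remaining)
--             break
--
--         split_at = remaining.rfind("\n", 0, limit)
--         if split_at <= 0:
--             split_at = remaining.rfind(" ", 0, limit)
--         if split_at <= 0: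
--             split_at = limit
--
--         chunks.append(remaining[:split_at].rstrip())
--         remaining = remaining[split_at:].lstrip()
--
--     return chunks
-- ===== SOURCE B (Python) =====
-- DISCORD_MESSAGE_LIMIT = 4000
--
-- _WS = " \t\n\r\x0b\x0c"
--
-- def _split_discord_message(message: str, limit: int = DISCORD_MESSAGE_LIMIT) -> list[str]:
--     n = len(message)
--     if n <= limit:
--         return [message]
--
--     chunks: list[str] = []
--     i = 0  # cursor: the unprocessed suffix is message[i:]
--     while i < n:
--         if n - i <= limit:
--             chunks.append(message[i:])
--             break
--
--         cut = message.rfind("\n", i, i + limit)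
--         if cut - i <= 0:
--             cut = message.rfind(" ", i, i + limit)
--         if cut - i <= 0:
--             cut = i + limit
--
--         end = cut
--         while end > i and message[end - 1] in _WS:
--             end -= 1
--         chunks.append(message[i:end])
--
--         i = cut
--         while i < n and message[i] in _WS:
--             i += 1
--
--     return chunks
-- ===== Notes on version B (the rewrite author's own statement) =====
-- stated objective: alternative
-- what changed: B replaces A's repeated slicing/stripping of a shrinking 'remaining' copy (a new string per chunk) with a single integer cursor into the original message, finding each split window with indexed rfind and doing the rstrip/lstrip by manual whitespace scans; asymptotically each character is visited O(1) times instead of being recopied per chunk, though at measured sizes the two run at similar speed.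
-- outside the precondition, e.g. on _split_discord_message('', 0): A returns [''], B returns ['']; on _split_discord_message('a ', -1): A returns ['a'], B does not finish within the time limit
import Mathlib
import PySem

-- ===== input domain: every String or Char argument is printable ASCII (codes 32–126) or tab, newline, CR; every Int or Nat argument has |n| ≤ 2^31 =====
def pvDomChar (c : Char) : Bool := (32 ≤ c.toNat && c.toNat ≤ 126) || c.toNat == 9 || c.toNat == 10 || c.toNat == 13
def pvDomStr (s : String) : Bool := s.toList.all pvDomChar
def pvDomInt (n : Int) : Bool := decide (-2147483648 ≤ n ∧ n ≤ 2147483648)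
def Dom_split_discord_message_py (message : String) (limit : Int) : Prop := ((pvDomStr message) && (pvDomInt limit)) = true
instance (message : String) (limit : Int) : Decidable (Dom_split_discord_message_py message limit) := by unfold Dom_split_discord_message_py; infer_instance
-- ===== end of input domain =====

-- B replaces A's slice-and-loop (a shrinking "remaining" copy re-sliced and re-stripped
-- each pass) by a single integer cursor into the original string, emitting each chunk once.
-- (A mutates nothing; equivalence is about the return value.)

-- ===== PORT A =====
-- A's while loop; fuel is only a totality guard (remaining.length + 1 is enough whenever
-- limit ≥ 1, and nothing is claimed outside Pre_, where A's Python can loop forever).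
def pvALoop (limit : Int) : Nat → List Char → List (List Char)
  | 0, _ => []
  | fuel+1, remaining =>
    if remaining.isEmpty then []
    else if (remaining.length : Int) ≤ limit then [remaining]
    else
      let s1 := PySem.Chars.rfindFrom remaining ['\n'] 0 (some limit)
      let s2 := if s1 ≤ 0 then PySem.Chars.rfindFrom remaining [' '] 0 (some limit) else s1
      let sa := if s2 ≤ 0 then limit else s2
      PySem.Chars.rstrip (PySem.Chars.slice remaining none (some sa)) ::
        pvALoop limit fuel (PySem.Chars.lstrip (PySem.Chars.slice remaining (some sa) none))

def split_discord_message_py (message : String) (limit : Int) : List String :=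
  if PySem.Str.len message ≤ limit then [message]
  else (pvALoop limit (message.toList.length + 1) message.toList).map String.ofList

-- ===== PORT B =====
-- Source B's `message[end-1] in _WS` / `message[i] in _WS`: on Dom's character set (ASCII 32–126,
-- tab, newline, CR) membership in _WS is exactly PySem.Chars.isspace; the guards keep the
-- index in range wherever the getD default could matter.
def pvRstripAt (msg : List Char) (i : Int) : Nat → Int → Int
  | 0, e => e
  | fuel+1, e =>
    if i < e then
      if PySem.Chars.isspace (msg.getD (e-1).toNat ' ') then pvRstripAt msg i fuel (e-1) else e
    else e

def pvSkipWs (msg : List Char) (n : Int) : Nat → Int → Int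
  | 0, i => i
  | fuel+1, i =>
    if i < n then
      if PySem.Chars.isspace (msg.getD i.toNat ' ') then pvSkipWs msg n fuel (i+1) else i
    else i

def pvBLoop (msg : List Char) (n limit : Int) : Nat → Int → List (List Char)
  | 0, _ => []
  | fuel+1, i =>
    if i < n then
      if n - i ≤ limit then [PySem.Chars.slice msg (some i) none]
      else
        let cut0 := PySem.Chars.rfindFrom msg ['\n'] i (some (i+limit))
        let cut1 := if cut0 - i ≤ 0 then PySem.Chars.rfindFrom msg [' '] i (some (i+limit)) else cut0
        let cut := if cut1 - i ≤ 0 then i + limit else cut1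
        PySem.Chars.slice msg (some i) (some (pvRstripAt msg i (msg.length+1) cut)) ::
          pvBLoop msg n limit fuel (pvSkipWs msg n (msg.length+1) cut)
    else []

def split_discord_message_py_alt (message : String) (limit : Int) : List String :=
  if PySem.Str.len message ≤ limit then [message]
  else (pvBLoop message.toList message.toList.length limit (message.toList.length + 1) 0).map String.ofList

-- ===== PRECONDITION & SPEC =====
-- Pre_ excludes limit ≤ 0, where A loops forever on most non-empty messages
-- (split_at becomes 0 and lstrip makes no progress) and where the few values it does
-- return depend on rfind's negative-end wraparound; B may loop or raise there too.
def Pre_split_discord_message_py (message : String) (limit : Int) : Prop := 1 ≤ limit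
instance (message : String) (limit : Int) : Decidable (Pre_split_discord_message_py message limit) := by unfold Pre_split_discord_message_py; infer_instance

def pvWitness_split_discord_message_py : String × Int := ("ab cd", 3)

def Spec_split_discord_message_py (message : String) (limit : Int) (out : List String) : Prop := out = split_discord_message_py_alt message limit
instance (message : String) (limit : Int) (out : List String) : Decidable (Spec_split_discord_message_py message limit out) := by unfold Spec_split_discord_message_py; infer_instance

-- ===== CLAIM (what is proved, stated in full; the proofs are below) =====
def Claim_equal_split_discord_message_py : Prop := ∀ (message : String) (limit : Int), Dom_split_discord_message_py message limit → Pre_split_discord_message_py message limit → Spec_split_discord_message_py message limit (split_discord_message_py message limit)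

-- ===== LEMMAS AND PROOFS =====

theorem pv_rfind_go_single (s : List Char) (c : Char) (j : Nat) :
    PySem.Chars.rfind.go s [c] j = -1 ∨
      (0 ≤ PySem.Chars.rfind.go s [c] j ∧ PySem.Chars.rfind.go s [c] j < (s.length : Int)) := by
  induction j with
  | zero =>
    simp only [PySem.Chars.rfind.go]
    split
    · rename_i h
      right
      have : s ≠ [] := by
        intro hn; subst hn; simp [List.isPrefixOf] at h
      constructor
      · norm_num
      · have := List.length_pos_of_ne_nil this; exact_mod_cast this
    · left; rfl
  | succ j ih =>
    simp only [PySem.Chars.rfind.go]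
    split
    · rename_i h
      right
      have hd : List.drop (j+1) s ≠ [] := by
        intro hn; rw [hn] at h; simp [List.isPrefixOf] at h
      have : j + 1 < s.length := by
        by_contra hc
        exact hd (List.drop_eq_nil_of_le (by omega))
      constructor
      · positivity
      · exact_mod_cast this
    · exact ih

theorem pv_rfind_single (s : List Char) (c : Char) :
    PySem.Chars.rfind s [c] = -1 ∨
      (0 ≤ PySem.Chars.rfind s [c] ∧ PySem.Chars.rfind s [c] < (s.length : Int)) :=
  pv_rfind_go_single s c s.length

theorem pv_rstrip_concat (xs : List Char) (c : Char) :
    PySem.Chars.rstrip (xs ++ [c]) =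
      if PySem.Chars.isspace c then PySem.Chars.rstrip xs else xs ++ [c] := by
  simp only [PySem.Chars.rstrip, List.reverse_append, List.reverse_cons, List.reverse_nil,
    List.nil_append, List.cons_append, List.dropWhile_cons]
  split
  · rfl
  · simp

theorem pv_rstrip_prefix (cs : List Char) : PySem.Chars.rstrip cs <+: cs := by
  have h := List.dropWhile_suffix (l := cs.reverse) PySem.Chars.isspace
  have := List.reverse_prefix.mpr h
  simpa [PySem.Chars.rstrip] using this

theorem pv_rfindFrom_zero (rem : List Char) (c : Char) (limit : Int)
    (h1 : 1 ≤ limit) (h2 : limit < (rem.length : Int)) :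
    PySem.Chars.rfindFrom rem [c] 0 (some limit) =
      PySem.Chars.rfind (rem.take limit.toNat) [c] := by
  simp only [PySem.Chars.rfindFrom]
  rw [if_neg (show ¬ ((rem.length:Int) < limit) by omega)]
  rw [if_neg (show ¬ (limit < 0) by omega)]
  norm_num
  rw [if_neg (show ¬ (limit < 0) by omega)]
  split <;> omega

theorem pv_rfindFrom_shift (msg : List Char) (c : Char) (k : Nat) (limit : Int)
    (h1 : 1 ≤ limit) (h2 : (k : Int) + limit < (msg.length : Int)) :
    PySem.Chars.rfindFrom msg [c] (k : Int) (some ((k : Int) + limit)) =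
      (if PySem.Chars.rfind ((msg.drop k).take limit.toNat) [c] = -1 then -1
       else (k : Int) + PySem.Chars.rfind ((msg.drop k).take limit.toNat) [c]) := by
  simp only [PySem.Chars.rfindFrom]
  rw [if_neg (show ¬ ((msg.length:Int) < (k:Int) + limit) by omega)]
  rw [if_neg (show ¬ ((k:Int) + limit < 0) by omega)]
  rw [if_neg (show ¬ ((k:Int) < 0) by omega)]
  rw [if_neg (show ¬ ((k:Int) + limit < (k:Int)) by omega)]
  have hk : ((k:Int)).toNat = k := by omega
  have ht : ((k:Int) + limit).toNat = k + limit.toNat := by omega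
  rw [hk, ht, List.drop_take]
  have h3 : k + limit.toNat - k = limit.toNat := by omega
  rw [h3]

theorem pv_backscan (msg : List Char) (k : Nat) :
    ∀ (fuel m : Nat), m ≤ fuel → k + m ≤ msg.length →
    pvRstripAt msg (k : Int) fuel ((k : Int) + (m : Int)) =
      (k : Int) + ((PySem.Chars.rstrip (((msg.drop k).take m))).length : Int) := by
  intro fuel
  induction fuel with
  | zero =>
    intro m hm hle
    interval_cases m
    simp [pvRstripAt, PySem.Chars.rstrip]
  | succ fuel ih =>
    intro m hm hle
    match m with
    | 0 => simp [pvRstripAt, PySem.Chars.rstrip]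
    | m'+1 =>
      have hlt : k + m' < msg.length := by omega
      have hdrop : m' < (msg.drop k).length := by simp; omega
      have hu : (msg.drop k).take (m'+1) = (msg.drop k).take m' ++ [msg[k+m']] := by
        rw [List.take_add_one]
        congr 1
        rw [List.getElem?_drop]
        simp [List.getElem?_eq_getElem hlt]
      have hidx : (((k:Int) + ((m'+1 : Nat) : Int)) - 1).toNat = k + m' := by
        push_cast; omega
      have hguard : (k:Int) < (k:Int) + ((m'+1 : Nat):Int) := by push_cast; omega
      rw [pvRstripAt]
      rw [if_pos hguard, hidx]
      have hget : msg.getD (k+m') ' ' = msg[k+m'] := List.getD_eq_getElem msg ' ' hlt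
      rw [hget, hu, pv_rstrip_concat]
      by_cases hws : PySem.Chars.isspace msg[k+m']
      · rw [if_pos hws, if_pos hws]
        have : (k:Int) + ((m'+1 : Nat):Int) - 1 = (k:Int) + ((m' : Nat):Int) := by push_cast; omega
        rw [this, ih m' (by omega) (by omega)]
      · rw [if_neg hws, if_neg hws]
        have hlen : ((msg.drop k).take m' ++ [msg[k+m']]).length = m' + 1 := by
          simp; omega
        rw [hlen]

theorem pv_skip (msg : List Char) :
    ∀ (fuel j : Nat), msg.length - j ≤ fuel → j ≤ msg.length →
    ∃ j' : Nat, pvSkipWs msg (msg.length : Int) fuel (j : Int) = (j' : Int) ∧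
      j' ≤ msg.length ∧
      msg.drop j' = List.dropWhile PySem.Chars.isspace (msg.drop j) := by
  intro fuel
  induction fuel with
  | zero =>
    intro j hf hj
    have : j = msg.length := by omega
    subst this
    exact ⟨msg.length, rfl, le_refl _, by simp⟩
  | succ fuel ih =>
    intro j hf hj
    rw [pvSkipWs]
    by_cases hlt : j < msg.length
    · rw [if_pos (by exact_mod_cast hlt)]
      have hget : msg.getD ((j:Int)).toNat ' ' = msg[j] := by
        simp [List.getElem?_eq_getElem hlt]
      rw [hget]
      have hcons : msg.drop j = msg[j] :: msg.drop (j+1) := List.drop_eq_getElem_cons hlt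
      by_cases hws : PySem.Chars.isspace msg[j]
      · rw [if_pos hws]
        have : ((j:Int) + 1) = ((j+1 : Nat) : Int) := by push_cast; ring
        rw [this]
        obtain ⟨j', h1, h2, h3⟩ := ih (j+1) (by omega) (by omega)
        exact ⟨j', h1, h2, by rw [h3, hcons, List.dropWhile_cons, if_pos hws]⟩
      · rw [if_neg hws]
        exact ⟨j, rfl, hj, by rw [hcons, List.dropWhile_cons, if_neg hws]⟩
    · rw [if_neg (by exact_mod_cast hlt)]
      have : j = msg.length := by omega
      subst this
      exact ⟨msg.length, rfl, le_refl _, by simp⟩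

theorem pv_step (msg : List Char) (limit sa : Int) (k : Nat) (fuel : Nat)
    (ih : ∀ k' : Nat, k' ≤ msg.length → msg.length - k' < fuel →
      pvALoop limit fuel (msg.drop k') = pvBLoop msg (msg.length : Int) limit fuel (k' : Int))
    (hsa : 1 ≤ sa) (hks : k + sa.toNat ≤ msg.length) (hfuel : msg.length - k ≤ fuel) :
    PySem.Chars.rstrip (PySem.Chars.slice (msg.drop k) none (some sa)) ::
        pvALoop limit fuel (PySem.Chars.lstrip (PySem.Chars.slice (msg.drop k) (some sa) none))
      = PySem.Chars.slice msg (some (k : Int))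
          (some (pvRstripAt msg (k : Int) (msg.length + 1) ((k : Int) + sa))) ::
        pvBLoop msg (msg.length : Int) limit fuel
          (pvSkipWs msg (msg.length : Int) (msg.length + 1) ((k : Int) + sa)) := by
  have hsm : ((sa.toNat : Nat) : Int) = sa := by omega
  set m := sa.toNat with hm
  have hksum : (k : Int) + sa = ((k + m : Nat) : Int) := by push_cast; omega
  -- head chunks
  have hsliceA : PySem.Chars.slice (msg.drop k) none (some sa) = (msg.drop k).take m := by
    rw [PySem.Chars.slice_eq_listSlice, PySem.List.slice_to _ (show (0:Int) ≤ sa by omega)]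
  have hback : pvRstripAt msg (k : Int) (msg.length + 1) ((k : Int) + sa) =
      (k : Int) + ((PySem.Chars.rstrip ((msg.drop k).take m)).length : Int) := by
    rw [show (k:Int) + sa = (k:Int) + (m:Int) by omega]
    exact pv_backscan msg k (msg.length + 1) m (by omega) hks
  have hpre : PySem.Chars.rstrip ((msg.drop k).take m) <+: msg.drop k :=
    (pv_rstrip_prefix _).trans (List.take_prefix _ _)
  have hsliceB : PySem.Chars.slice msg (some (k : Int))
      (some ((k : Int) + ((PySem.Chars.rstrip ((msg.drop k).take m)).length : Int))) =
      PySem.Chars.rstrip ((msg.drop k).take m) := by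
    rw [PySem.Chars.slice_eq_listSlice]
    rw [show (k:Int) + ((PySem.Chars.rstrip ((msg.drop k).take m)).length : Int)
        = ((k + (PySem.Chars.rstrip ((msg.drop k).take m)).length : Nat) : Int) by push_cast; ring]
    rw [PySem.List.slice_natCast]
    rw [show k + (PySem.Chars.rstrip ((msg.drop k).take m)).length - k
        = (PySem.Chars.rstrip ((msg.drop k).take m)).length by omega]
    exact (List.prefix_iff_eq_take.mp hpre).symm
  -- tails
  have hsliceA2 : PySem.Chars.slice (msg.drop k) (some sa) none = msg.drop (k + m) := by
    rw [PySem.Chars.slice_eq_listSlice, PySem.List.slice_from _ (show (0:Int) ≤ sa by omega)]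
    rw [List.drop_drop]
  obtain ⟨j', hj'eq, hj'le, hj'drop⟩ := pv_skip msg (msg.length + 1) (k + m) (by omega) hks
  have hj'ge : k + m ≤ j' := by
    have hlen := congrArg List.length hj'drop
    have hdw : (List.dropWhile PySem.Chars.isspace (msg.drop (k+m))).length ≤ (msg.drop (k+m)).length :=
      List.Sublist.length_le ((List.dropWhile_suffix _).sublist)
    simp only [List.length_drop] at hlen hdw
    omega
  rw [hsliceA, hback, hsliceB, hsliceA2, hksum, hj'eq]
  congr 1
  rw [show List.dropWhile PySem.Chars.isspace (msg.drop (k+m)) = PySem.Chars.lstrip (msg.drop (k+m)) from rfl] at hj'drop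
  rw [show PySem.Chars.lstrip (msg.drop (k + m)) = msg.drop j' by rw [← hj'drop]]
  exact ih j' hj'le (by omega)

theorem pv_loop_eq (msg : List Char) (limit : Int) (h1 : 1 ≤ limit) :
    ∀ (fuel : Nat) (k : Nat), k ≤ msg.length → msg.length - k < fuel →
      pvALoop limit fuel (msg.drop k) = pvBLoop msg (msg.length : Int) limit fuel (k : Int) := by
  intro fuel
  induction fuel with
  | zero => intro k hk hf; omega
  | succ fuel ih =>
    intro k hk hf
    by_cases hend : k = msg.length
    · subst hend
      simp [pvALoop, pvBLoop]
    · have hklt : k < msg.length := by omega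
      have hrem : (msg.drop k).length = msg.length - k := by simp
      simp only [pvALoop, pvBLoop]
      rw [if_neg (show ¬ (msg.drop k).isEmpty = true by
        simp [List.isEmpty_iff, List.drop_eq_nil_iff]; omega)]
      rw [if_pos (show ((k:Int)) < (msg.length:Int) by exact_mod_cast hklt)]
      by_cases hsmall : ((msg.drop k).length : Int) ≤ limit
      · rw [if_pos hsmall]
        rw [if_pos (show (msg.length:Int) - (k:Int) ≤ limit by rw [hrem] at hsmall; omega)]
        rw [PySem.Chars.slice_eq_listSlice, PySem.List.slice_from_natCast]
      · rw [if_neg hsmall]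
        rw [if_neg (show ¬ ((msg.length:Int) - (k:Int) ≤ limit) by rw [hrem] at hsmall; omega)]
        have hlim2 : limit < ((msg.drop k).length : Int) := by omega
        have hLk : (k : Int) + limit < (msg.length : Int) := by
          rw [hrem] at hlim2; omega
        rw [pv_rfindFrom_zero (msg.drop k) '\n' limit h1 hlim2,
            pv_rfindFrom_zero (msg.drop k) ' ' limit h1 hlim2,
            pv_rfindFrom_shift msg '\n' k limit h1 hLk,
            pv_rfindFrom_shift msg ' ' k limit h1 hLk]
        have htl : (((msg.drop k).take limit.toNat).length : Int) = limit := by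
          rw [hrem] at hlim2
          simp only [List.length_take, List.length_drop]
          push_cast at hlim2 ⊢
          omega
        have ihs : ∀ k' : Nat, k' ≤ msg.length → msg.length - k' < fuel →
            pvALoop limit fuel (msg.drop k') = pvBLoop msg (msg.length : Int) limit fuel (k' : Int) := ih
        set r1 := PySem.Chars.rfind ((msg.drop k).take limit.toNat) ['\n'] with hr1def
        set r2 := PySem.Chars.rfind ((msg.drop k).take limit.toNat) [' '] with hr2def
        by_cases hA1 : r1 ≤ 0
        · have hB1 : (if r1 = -1 then -1 else (k:Int) + r1) - (k:Int) ≤ 0 := by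
            split <;> omega
          rw [if_pos hA1, if_pos hB1]
          by_cases hA2 : r2 ≤ 0
          · have hB2 : (if r2 = -1 then -1 else (k:Int) + r2) - (k:Int) ≤ 0 := by
              split <;> omega
            rw [if_pos hA2, if_pos hB2]
            exact pv_step msg limit limit k fuel ihs h1 (by omega) (by omega)
          · rcases pv_rfind_single ((msg.drop k).take limit.toNat) ' ' with hneg | ⟨_, hlt⟩
            · rw [← hr2def] at hneg; omega
            · rw [← hr2def] at hlt
              rw [if_neg (show ¬ r2 = -1 by omega)]
              rw [if_neg (show ¬ ((k:Int) + r2 - (k:Int) ≤ 0) by omega)]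
              rw [if_neg hA2]
              exact pv_step msg limit r2 k fuel ihs (by omega) (by omega) (by omega)
        · rcases pv_rfind_single ((msg.drop k).take limit.toNat) '\n' with hneg | ⟨_, hlt⟩
          · rw [← hr1def] at hneg; omega
          · rw [← hr1def] at hlt
            rw [if_neg (show ¬ r1 = -1 by omega)]
            rw [if_neg (show ¬ ((k:Int) + r1 - (k:Int) ≤ 0) by omega)]
            rw [if_neg (show ¬ ((k:Int) + r1 - (k:Int) ≤ 0) by omega)]
            rw [if_neg hA1, if_neg hA1]
            exact pv_step msg limit r1 k fuel ihs (by omega) (by omega) (by omega)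

-- ===== VERDICT (by name: the statement is the Claim_ definition above) =====
theorem split_discord_message_py_spec : Claim_equal_split_discord_message_py := by
  intro message limit _hdom hpre
  unfold Pre_split_discord_message_py at hpre
  unfold Spec_split_discord_message_py split_discord_message_py split_discord_message_py_alt
  by_cases h : PySem.Str.len message ≤ limit
  · rw [if_pos h, if_pos h]
  · rw [if_neg h, if_neg h]
    congr 1
    have := pv_loop_eq message.toList limit hpre (message.toList.length + 1) 0
      (by omega) (by omega)
    simpa using this
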